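-- pv_equiv track=rewrite | github.com/ManojPolapally/AI-BUSINESS-ANALYZER | backend/langgraph_pipeline.py | _pick_columns_from_question
-- ===== SOURCE A (Python) =====
-- def _pick_columns_from_question(
--     question: str,
--     categorical_cols: list[str],
--     numeric_cols: list[str],
-- ) -> tuple[str | None, str | None]:
--     """
--     Scan the question text for column-name keywords and return (x_col, y_col).
--     Falls back to the first categorical + first numeric column when no match.
--     """
--     q_lower = question.lower()
--
--     # Score each column by how many of its tokens appear in the question
--     def score(col: str) -> int:
--         tokens = col.lower().replace("_", " ").split()
--         return sum(1 for t in tokens if t in q_lower)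
--
--     # Time / trend keywords → prefer date-like column as x
--     time_keywords = ("trend", "month", "monthly", "over time", "time", "date",
--                      "week", "year", "quarter", "period")
--     wants_time = any(kw in q_lower for kw in time_keywords)
--
--     # Pick best x (categorical / date)
--     scored_cat = sorted(categorical_cols, key=score, reverse=True)
--     if wants_time:
--         # Prefer columns whose name contains date/month/time
--         date_cols = [c for c in categorical_cols
--                      if any(kw in c.lower() for kw in ("date", "month", "time",
--                                                         "week", "year", "period"))]
--         x_col = date_cols[0] if date_cols else (scored_cat[0] if scored_cat else None)
--     else:
--         x_col = scored_cat[0] if scored_cat else None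
--
--     # Pick best y (numeric)
--     scored_num = sorted(numeric_cols, key=score, reverse=True)
--     y_col = scored_num[0] if scored_num else None
--
--     return x_col, y_col
-- ===== SOURCE B (Python) =====
-- def _pick_columns_from_question(
--     question: str,
--     categorical_cols: list[str],
--     numeric_cols: list[str],
-- ) -> tuple[str | None, str | None]:
--     """Accumulator variant: one explicit pass per column list keeping a
--     running (best, best_score) pair (and, for categoricals, the first
--     date-like name) instead of sorting and indexing."""
--     q_lower = question.lower()
--
--     def score(col: str) -> int:
--         tokens = col.lower().replace("_", " ").split()
--         return sum(1 for t in tokens if t in q_lower)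
--
--     time_keywords = ("trend", "month", "monthly", "over time", "time", "date",
--                      "week", "year", "quarter", "period")
--     wants_time = any(kw in q_lower for kw in time_keywords)
--
--     date_kws = ("date", "month", "time", "week", "year", "period")
--
--     first_date = None
--     best_cat = None  # (name, score) of the current best categorical
--     for c in categorical_cols:
--         if wants_time and first_date is None and any(kw in c.lower() for kw in date_kws):
--             first_date = c
--         s = score(c)
--         if best_cat is None or s > best_cat[1]:
--             best_cat = (c, s)
--
--     x_col = first_date if first_date is not None else (best_cat[0] if best_cat else None)
--
--     best_num = None
--     for c in numeric_cols:
--         s = score(c)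
--         if best_num is None or s > best_num[1]:
--             best_num = (c, s)
--     y_col = best_num[0] if best_num else None
--
--     return x_col, y_col
-- ===== Notes on version B (the rewrite author's own statement) =====
-- stated objective: alternative
-- what changed: The two sorted(cols, key=score, reverse=True)[0] sorts and the date_cols list comprehension are replaced by explicit single-pass accumulator loops: one pass over categorical_cols maintains both the first date-like name and a running (best, best_score) pair, one pass over numeric_cols maintains the running best; no sorted list or filtered list is ever built.
import Mathlib
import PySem

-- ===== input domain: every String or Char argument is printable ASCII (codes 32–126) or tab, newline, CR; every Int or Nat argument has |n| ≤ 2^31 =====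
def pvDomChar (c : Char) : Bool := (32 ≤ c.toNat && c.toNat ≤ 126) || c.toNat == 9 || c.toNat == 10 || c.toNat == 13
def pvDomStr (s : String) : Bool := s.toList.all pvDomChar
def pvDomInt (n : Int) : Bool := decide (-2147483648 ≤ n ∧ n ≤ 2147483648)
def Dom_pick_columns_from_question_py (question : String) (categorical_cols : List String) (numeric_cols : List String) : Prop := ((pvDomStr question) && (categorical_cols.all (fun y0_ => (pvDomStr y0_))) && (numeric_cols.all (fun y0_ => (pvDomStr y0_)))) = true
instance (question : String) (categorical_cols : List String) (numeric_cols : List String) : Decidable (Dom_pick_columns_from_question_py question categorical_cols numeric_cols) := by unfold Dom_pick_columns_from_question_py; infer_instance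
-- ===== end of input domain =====

-- B replaces A's sort-then-take-first (and the filtered date_cols list) by explicit
-- single-pass accumulator loops carrying a running (best, score) pair; objective: alternative.

-- ===== PORT A =====
-- score(col): count of the column's tokens occurring in the lowered question
def pvScore (q_lower : String) (col : String) : Int :=
  ((PySem.Str.split₀ (PySem.Str.replace (PySem.Str.lower col) "_" " ")).foldl
    (fun acc t => if PySem.Str.isIn t q_lower then acc + 1 else acc) 0)

def pvTimeKeywords : List String :=
  ["trend", "month", "monthly", "over time", "time", "date", "week", "year", "quarter", "period"]

def pvDateKeywords : List String := ["date", "month", "time", "week", "year", "period"]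

def pick_columns_from_question_py (question : String) (categorical_cols : List String) (numeric_cols : List String) : Option String × Option String :=
  let q_lower := PySem.Str.lower question
  let score := pvScore q_lower
  let wants_time := pvTimeKeywords.any (fun kw => PySem.Str.isIn kw q_lower)
  let scored_cat := PySem.List.sorted categorical_cols score true
  let x_col :=
    if wants_time then
      let date_cols := categorical_cols.filter
        (fun c => pvDateKeywords.any (fun kw => PySem.Str.isIn kw (PySem.Str.lower c)))
      if !date_cols.isEmpty then date_cols.head? else scored_cat.head?
    else scored_cat.head?
  let scored_num := PySem.List.sorted numeric_cols score true
  let y_col := scored_num.head?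
  (x_col, y_col)

-- ===== PORT B =====
-- running-best accumulator loop: best = the first column with maximal score seen so far, with its score
def pvBestLoop (score : String → Int) : List String → Option (String × Int) → Option (String × Int)
  | [], best => best
  | c :: rest, best =>
    let s := score c
    pvBestLoop score rest
      (match best with
       | none => some (c, s)
       | some (b, bs) => if s > bs then some (c, s) else some (b, bs))

-- the categorical pass additionally records the first date-like column name
def pvCatLoop (score : String → Int) (dateLike : String → Bool) (wants_time : Bool) :
    List String → Option String → Option (String × Int) → Option String × Option (String × Int)
  | [], fd, best => (fd, best)
  | c :: rest, fd, best =>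
    let fd' := if wants_time && fd.isNone && dateLike c then some c else fd
    let s := score c
    pvCatLoop score dateLike wants_time rest fd'
      (match best with
       | none => some (c, s)
       | some (b, bs) => if s > bs then some (c, s) else some (b, bs))

def pick_columns_from_question_py_alt (question : String) (categorical_cols : List String) (numeric_cols : List String) : Option String × Option String :=
  let q_lower := PySem.Str.lower question
  let score := pvScore q_lower
  let wants_time := pvTimeKeywords.any (fun kw => PySem.Str.isIn kw q_lower)
  let dateLike := fun c => pvDateKeywords.any (fun kw => PySem.Str.isIn kw (PySem.Str.lower c))
  let (first_date, best_cat) := pvCatLoop score dateLike wants_time categorical_cols none none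
  let x_col :=
    match first_date with
    | some c => some c
    | none => best_cat.map Prod.fst
  let y_col := (pvBestLoop score numeric_cols none).map Prod.fst
  (x_col, y_col)

-- ===== PRECONDITION & SPEC =====
def Spec_pick_columns_from_question_py (question : String) (categorical_cols : List String) (numeric_cols : List String) (out : Option String × Option String) : Prop := out = pick_columns_from_question_py_alt question categorical_cols numeric_cols
instance (question : String) (categorical_cols : List String) (numeric_cols : List String) (out : Option String × Option String) : Decidable (Spec_pick_columns_from_question_py question categorical_cols numeric_cols out) := by unfold Spec_pick_columns_from_question_py; infer_instance

-- ===== CLAIM (what is proved, stated in full; the proofs are below) =====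
def Claim_equal_pick_columns_from_question_py : Prop := ∀ (question : String) (categorical_cols : List String) (numeric_cols : List String), Dom_pick_columns_from_question_py question categorical_cols numeric_cols → Spec_pick_columns_from_question_py question categorical_cols numeric_cols (pick_columns_from_question_py question categorical_cols numeric_cols)

-- ===== LEMMAS AND PROOFS =====

-- head of an insertBy-insertion is decided by the old head only
lemma head?_insertBy {α : Type} (before : α → α → Bool) (x : α) (acc : List α) :
    (PySem.List.insertBy before x acc).head? =
      (match acc.head? with
       | none => some x
       | some c => if before x c then some x else some c) := by
  cases acc with
  | nil => simp [PySem.List.insertBy]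
  | cons c t =>
    simp only [PySem.List.insertBy, List.head?_cons]
    split <;> simp_all

-- the head of a foldl of insertBy is the corresponding "running best" fold
lemma head?_foldl_insertBy {α : Type} (before : α → α → Bool) :
    ∀ (xs : List α) (acc : List α),
      (xs.foldl (fun a x => PySem.List.insertBy before x a) acc).head? =
        xs.foldl
          (fun h x =>
            match h with
            | none => some x
            | some c => if before x c then some x else some c) acc.head? := by
  intro xs
  induction xs with
  | nil => intro acc; rfl
  | cons x xs ih =>
    intro acc
    simp only [List.foldl_cons]
    rw [ih, head?_insertBy]

-- B's running-best loop, projected to the name, is the running-best fold of the sort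
lemma bestLoop_map_fst (score : String → Int) :
    ∀ (xs : List String) (acc : Option String),
      (pvBestLoop score xs (acc.map (fun c => (c, score c)))).map Prod.fst =
        xs.foldl
          (fun h x =>
            match h with
            | none => some x
            | some c => if decide (score c < score x) then some x else some c) acc := by
  intro xs
  induction xs with
  | nil => intro acc; cases acc <;> rfl
  | cons x xs ih =>
    intro acc
    simp only [pvBestLoop, List.foldl_cons]
    cases acc with
    | none => exact ih (some x)
    | some c =>
      simp only [Option.map_some]
      by_cases h : score c < score x
      · simpa [h, gt_iff_lt] using ih (some x)
      · simpa [h, gt_iff_lt] using ih (some c)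

-- first element of the stable reverse sort IS B's running-best scan
lemma head?_sorted_rev_eq_bestLoop (score : String → Int) (xs : List String) :
    (PySem.List.sorted xs score true).head? =
      (pvBestLoop score xs none).map Prod.fst := by
  unfold PySem.List.sorted
  rw [head?_foldl_insertBy]
  have h := (bestLoop_map_fst score xs none).symm
  simp only [Option.map_none] at h
  refine Eq.trans ?_ h
  simp only [List.head?_nil]
  congr 1
  funext hx x
  cases hx <;> simp

-- the combined categorical pass splits into the first-match scan and the best scan
lemma catLoop_eq (score : String → Int) (dateLike : String → Bool) (wt : Bool) :
    ∀ (xs : List String) (fd : Option String) (best : Option (String × Int)),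
      pvCatLoop score dateLike wt xs fd best =
        ((match fd with
          | some c => some c
          | none => if wt then xs.find? dateLike else none),
         pvBestLoop score xs best) := by
  intro xs
  induction xs with
  | nil => intro fd best; cases fd <;> simp [pvCatLoop, pvBestLoop]
  | cons x xs ih =>
    intro fd best
    simp only [pvCatLoop, pvBestLoop]
    rw [ih]
    cases fd with
    | some c => simp
    | none =>
      cases wt with
      | false => simp
      | true =>
        by_cases h : dateLike x = true
        · simp [List.find?, h]
        · simp [List.find?, h]

-- ===== VERDICT (by name: the statement is the Claim_ definition above) =====
theorem pick_columns_from_question_py_spec : Claim_equal_pick_columns_from_question_py := by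
  intro question categorical_cols numeric_cols _
  unfold Spec_pick_columns_from_question_py
  unfold pick_columns_from_question_py pick_columns_from_question_py_alt
  simp only [catLoop_eq, head?_sorted_rev_eq_bestLoop]
  cases hw : pvTimeKeywords.any (fun kw => PySem.Str.isIn kw (PySem.Str.lower question)) with
  | false => simp
  | true =>
    simp only [if_true]
    cases hd : categorical_cols.find?
        (fun c => pvDateKeywords.any (fun kw => PySem.Str.isIn kw (PySem.Str.lower c))) with
    | none =>
      have hfil : categorical_cols.filter
          (fun c => pvDateKeywords.any (fun kw => PySem.Str.isIn kw (PySem.Str.lower c))) = [] :=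
        List.filter_eq_nil_iff.mpr (fun a ha => by simpa using List.find?_eq_none.mp hd a ha)
      rw [hfil]
      simp
    | some c =>
      have hh : (categorical_cols.filter
          (fun c => pvDateKeywords.any (fun kw => PySem.Str.isIn kw (PySem.Str.lower c)))).head? = some c := by
        rw [List.head?_filter, hd]
      cases hfe : categorical_cols.filter
          (fun c => pvDateKeywords.any (fun kw => PySem.Str.isIn kw (PySem.Str.lower c))) with
      | nil => rw [hfe] at hh; simp at hh
      | cons a t =>
        rw [hfe] at hh
        simpa using hh
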